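-- pv_equiv track=rewrite | github.com/ARAN1218/Algorithms | Local Search/greedy_search.py | greedy_search
-- ===== SOURCE A (Python) =====
-- def greedy_search(data, max_weight, currentSolution=[]):
--     # 近傍解を求める
--     def getNeighbors(solution):
--         neighbors = []
--         for i in range(len(solution)):
--                 neighbor = solution.copy()
--                 neighbor[i] = 1 if neighbor[i]==0 else 0
--                 neighbors.append(neighbor)
--         return neighbors
--
--     bestSolution = currentSolution if currentSolution else [0 for i in range(len(data))]
--     bestValue = 0
--     while True:
--         update = False
--         currentNeighbors = getNeighbors(bestSolution)
--         for neighbor in currentNeighbors: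
--             neighborWeight = sum([item[0] for i,item in enumerate(data) if neighbor[i] == 1])
--             neighborValue = sum([item[1] for i,item in enumerate(data) if neighbor[i] == 1])
--             if neighborWeight <= max_weight and bestValue < neighborValue:
--                 bestSolution = neighbor.copy()
--                 bestValue = neighborValue
--                 update = True
--
--         if not update: return bestSolution,bestValue
--
-- data = [(10,10), (20,20), (30,30), (40,10)]
--
-- max_weight = 50
-- ===== SOURCE B (Python) =====
-- def greedy_search(data, max_weight, currentSolution=[]):
--     # Incremental local search: per pass, compute the current selection's
--     # weight/value once, then score each single-flip neighbor in O(1) via the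
--     # sign of the flip (+1 selects the item, -1 deselects it), remembering the
--     # last improving flip of the pass.
--     n = len(data)
--     best = list(currentSolution) if currentSolution else [0] * n
--     bestValue = 0
--     while True:
--         baseW = sum(w for (w, _), s in zip(data, best) if s == 1)
--         baseV = sum(v for (_, v), s in zip(data, best) if s == 1)
--         flip = -1
--         for i, (w, v) in enumerate(data):
--             s = best[i]
--             d = (s == 0) - (s == 1)  # +1 selects the item, -1 deselects it
--             if baseW + d * w <= max_weight and bestValue < baseV + d * v:
--                 flip, bestValue = i, baseV + d * v
--         if flip < 0:
--             return best, bestValue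
--         best[flip] = 1 if best[flip] == 0 else 0
-- ===== Notes on version B (the rewrite author's own statement) =====
-- stated objective: faster
-- what changed: Instead of materialising every neighbor and recomputing its weight/value by a full scan of data (O(n) per neighbor, O(n^2) per pass), B computes the current selection's weight/value once per pass and scores each single-flip neighbor by an O(1) signed delta, remembering only the last improving flip index; Pre_ excludes non-empty currentSolution shorter than data (A raises IndexError) and currentSolution longer than data that already selects an item (a malformed solution vector, where A's and B's treatments of the meaningless trailing positions both are defensible).
-- outside the precondition, e.g. on greedy_search([(1, 5)], 10, [1, 0]): A returns ([1, 1], 5), B returns ([1, 0], 0)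
import Mathlib
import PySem

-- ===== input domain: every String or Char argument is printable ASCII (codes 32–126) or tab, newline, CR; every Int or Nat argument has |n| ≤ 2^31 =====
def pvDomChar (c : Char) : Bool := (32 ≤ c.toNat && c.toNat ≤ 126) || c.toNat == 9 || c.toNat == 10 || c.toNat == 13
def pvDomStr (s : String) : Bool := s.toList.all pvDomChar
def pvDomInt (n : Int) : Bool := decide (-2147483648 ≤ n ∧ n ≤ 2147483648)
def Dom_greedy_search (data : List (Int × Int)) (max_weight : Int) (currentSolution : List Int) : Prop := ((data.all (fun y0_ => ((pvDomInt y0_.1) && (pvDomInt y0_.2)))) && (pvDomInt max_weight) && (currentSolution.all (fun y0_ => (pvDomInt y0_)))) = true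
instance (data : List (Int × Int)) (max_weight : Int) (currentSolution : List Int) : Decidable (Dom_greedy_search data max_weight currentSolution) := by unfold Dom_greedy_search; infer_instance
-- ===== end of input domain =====

-- B replaces A's per-neighbor O(n) weight/value recomputation by a once-per-pass base sum
-- plus an O(1) signed delta per flipped item (objective: faster).
-- Both loop ports carry a fuel bound (a pure totality guard: each updating pass strictly
-- increases the integer bestValue, which is bounded by the sum of the positive values).

-- ===== PORT A =====
-- neighbor = solution.copy(); neighbor[i] = 1 if neighbor[i]==0 else 0
def pvFlipA (s : List Int) (i : Nat) : List Int :=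
  s.set i (if s.getD i 0 = 0 then 1 else 0)

def pvNeighbors (s : List Int) : List (List Int) :=
  (List.range s.length).map (pvFlipA s)

-- sum([f(item) for i,item in enumerate(data) if sel(i)])  (shape shared by the two comprehensions)
def pvSumSel (f : Int × Int → Int) (data : List (Int × Int)) (s : Int) (sel : Int → Bool) : Int :=
  (((PySem.List.enumerate data s).filter (fun p => sel p.1)).map (fun p => f p.2)).sum

-- neighbor[i] is in range whenever Pre_ holds; the default 0 is only reached where Python A raises
def pvWeightA (data : List (Int × Int)) (nb : List Int) : Int :=
  pvSumSel (fun d => d.1) data 0 (fun j => PySem.List.pyGetD nb j 0 == 1)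

def pvValueA (data : List (Int × Int)) (nb : List Int) : Int :=
  pvSumSel (fun d => d.2) data 0 (fun j => PySem.List.pyGetD nb j 0 == 1)

def pvStepA (data : List (Int × Int)) (mw : Int) (st : List Int × Int × Bool) (nb : List Int) :
    List Int × Int × Bool :=
  let w := pvWeightA data nb
  let v := pvValueA data nb
  if w ≤ mw ∧ st.2.1 < v then (nb, v, true) else st

def pvLoopA (data : List (Int × Int)) (mw : Int) : Nat → List Int → Int → List Int × Int
  | 0, best, val => (best, val)
  | fuel+1, best, val =>
    let st := (pvNeighbors best).foldl (pvStepA data mw) (best, val, false)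
    if st.2.2 then pvLoopA data mw fuel st.1 st.2.1 else (st.1, st.2.1)

def pvFuel (data : List (Int × Int)) : Nat :=
  ((data.map (fun d : Int × Int => max d.2 0)).sum).toNat + 2

def greedy_search (data : List (Int × Int)) (max_weight : Int) (currentSolution : List Int) :
    List Int × Int :=
  pvLoopA data max_weight (pvFuel data)
    (if currentSolution = [] then List.replicate data.length 0 else currentSolution) 0

-- ===== PORT B =====
-- baseW/baseV = sum over zip(data, best) of items with s == 1 (computed once per pass)
def pvBase (f : Int × Int → Int) (data : List (Int × Int)) (best : List Int) : Int :=
  (((data.zip best).filter (fun p => p.2 == 1)).map (fun p => f p.1)).sum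

-- d * w resp. d * v with d = (s == 0) - (s == 1); best[i] is in range whenever Pre_ holds
def pvDlt (f : Int × Int → Int) (data : List (Int × Int)) (best : List Int) (i : Nat) : Int :=
  ((if best.getD i 0 = 0 then (1 : Int) else 0) - (if best.getD i 0 = 1 then 1 else 0)) *
    f (data.getD i (0, 0))

def pvStepB (data : List (Int × Int)) (mw baseW baseV : Int) (best : List Int)
    (st : Int × Int) (i : Nat) : Int × Int :=
  if baseW + pvDlt (fun p => p.1) data best i ≤ mw ∧
      st.2 < baseV + pvDlt (fun p => p.2) data best i then
    ((i : Int), baseV + pvDlt (fun p => p.2) data best i)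
  else st

def pvLoopB (data : List (Int × Int)) (mw : Int) : Nat → List Int → Int → List Int × Int
  | 0, best, val => (best, val)
  | fuel+1, best, val =>
    let baseW := pvBase (fun p => p.1) data best
    let baseV := pvBase (fun p => p.2) data best
    let st := (List.range data.length).foldl (pvStepB data mw baseW baseV best) (-1, val)
    if st.1 < 0 then (best, st.2)
    else pvLoopB data mw fuel
      (best.set st.1.toNat (if best.getD st.1.toNat 0 = 0 then 1 else 0)) st.2

def greedy_search_alt (data : List (Int × Int)) (max_weight : Int) (currentSolution : List Int) :
    List Int × Int :=
  pvLoopB data max_weight (pvFuel data)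
    (if currentSolution = [] then List.replicate data.length 0 else currentSolution) 0

-- ===== PRECONDITION & SPEC =====
-- Pre_ excludes non-empty currentSolution shorter than data, on which A raises IndexError,
-- and currentSolution longer than data that already selects an item — a malformed solution
-- vector (more positions than items), where A may return a copy with a meaningless trailing
-- position flipped while B ignores the trailing positions: both defensible, neither claimed.
def Pre_greedy_search (data : List (Int × Int)) (max_weight : Int) (currentSolution : List Int) : Prop :=
  currentSolution = [] ∨ currentSolution.length = data.length ∨
    (data.length < currentSolution.length ∧
      ∀ s ∈ currentSolution.take data.length, s ≠ 1)

instance (data : List (Int × Int)) (max_weight : Int) (currentSolution : List Int) :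
    Decidable (Pre_greedy_search data max_weight currentSolution) := by
  unfold Pre_greedy_search; infer_instance

def pvWitness_greedy_search : (List (Int × Int)) × Int × List Int :=
  ([(10, 10), (20, 20), (30, 30), (40, 10)], 50, [])

def Spec_greedy_search (data : List (Int × Int)) (max_weight : Int) (currentSolution : List Int)
    (out : List Int × Int) : Prop := out = greedy_search_alt data max_weight currentSolution

instance (data : List (Int × Int)) (max_weight : Int) (currentSolution : List Int)
    (out : List Int × Int) : Decidable (Spec_greedy_search data max_weight currentSolution out) := by
  unfold Spec_greedy_search; infer_instance

-- ===== CLAIM =====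
def Claim_equal_greedy_search : Prop := ∀ (data : List (Int × Int)) (max_weight : Int) (currentSolution : List Int), Dom_greedy_search data max_weight currentSolution → Pre_greedy_search data max_weight currentSolution → Spec_greedy_search data max_weight currentSolution (greedy_search data max_weight currentSolution)

-- ===== LEMMAS AND PROOFS =====

lemma pvSumSel_nil (f : Int × Int → Int) (s : Int) (sel : Int → Bool) :
    pvSumSel f [] s sel = 0 := by
  simp [pvSumSel, PySem.List.enumerate]

lemma pvSumSel_cons (f : Int × Int → Int) (d : Int × Int) (t : List (Int × Int)) (s : Int)
    (sel : Int → Bool) :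
    pvSumSel f (d :: t) s sel = (if sel s then f d else 0) + pvSumSel f t (s + 1) sel := by
  simp only [pvSumSel, PySem.List.enumerate_cons, List.filter_cons]
  by_cases h : sel s <;> simp [h]

lemma pvSumSel_flip (f : Int × Int → Int) (sel sel' : Int → Bool) (i : Int) :
    ∀ (data : List (Int × Int)) (s : Int), s ≤ i →
    (∀ j, s ≤ j → j ≠ i → sel' j = sel j) →
    pvSumSel f data s sel' = pvSumSel f data s sel +
      (if i < s + (data.length : Int) then
        ((if sel' i then (1 : Int) else 0) - (if sel i then 1 else 0)) *
          f (data.getD (i - s).toNat (0, 0))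
       else 0) := by
  intro data
  induction data with
  | nil =>
    intro s hs _
    rw [pvSumSel_nil, pvSumSel_nil, if_neg (by simp; omega)]
    ring
  | cons d t ih =>
    intro s hs hag
    rw [pvSumSel_cons, pvSumSel_cons]
    by_cases his : i = s
    · subst his
      have hcg : ∀ dl : List (Int × Int), ∀ s' : Int, (∀ j, s' ≤ j → sel' j = sel j) →
          pvSumSel f dl s' sel' = pvSumSel f dl s' sel := by
        intro dl
        induction dl with
        | nil => intro s' _; simp [pvSumSel_nil]
        | cons d' t' ih' =>
          intro s' h
          rw [pvSumSel_cons, pvSumSel_cons, h s' le_rfl, ih' (s' + 1) (fun j hj => h j (by omega))]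
      rw [hcg t (i + 1) (fun j hj => hag j (by omega) (by omega))]
      have hc : i < i + (((d :: t).length : Nat) : Int) := by
        simp only [List.length_cons]; push_cast; omega
      rw [if_pos hc]
      have h0 : (i - i).toNat = 0 := by omega
      rw [h0, List.getD_cons_zero]
      split_ifs <;> ring
    · have hhead : sel' s = sel s := hag s le_rfl (fun h => his h.symm)
      rw [hhead, ih (s + 1) (by omega) (fun j hj hne => hag j (by omega) hne)]
      have hcond : (i < s + 1 + (t.length : Int)) = (i < s + ((d :: t).length : Int)) := by
        have : s + 1 + (t.length : Int) = s + ((d :: t).length : Int) := by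
          simp only [List.length_cons]; push_cast; ring
        rw [this]
      have hidx : (i - (s + 1)).toNat + 1 = (i - s).toNat := by omega
      have hget : t.getD (i - (s + 1)).toNat (0, 0) = (d :: t).getD (i - s).toNat (0, 0) := by
        rw [← hidx, List.getD_cons_succ]
      have hif : (if i < s + 1 + (t.length : Int) then
            ((if sel' i then (1 : Int) else 0) - (if sel i then 1 else 0)) *
              f (t.getD (i - (s + 1)).toNat (0, 0)) else 0) =
          (if i < s + (((d :: t).length : Nat) : Int) then
            ((if sel' i then (1 : Int) else 0) - (if sel i then 1 else 0)) *
              f ((d :: t).getD (i - s).toNat (0, 0)) else 0) :=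
        if_congr (iff_of_eq hcond) (by rw [hget]) rfl
      rw [hif, add_assoc]

lemma pvBase_cons (f : Int × Int → Int) (d : Int × Int) (t : List (Int × Int)) (b : Int)
    (r : List Int) :
    pvBase f (d :: t) (b :: r) = (if b = 1 then f d else 0) + pvBase f t r := by
  simp only [pvBase, List.zip_cons_cons, List.filter_cons]
  by_cases h : b = 1 <;> simp [h]

lemma pvSumSel_eq_pvBase (f : Int × Int → Int) :
    ∀ (data : List (Int × Int)) (k : Nat) (best : List Int),
    pvSumSel f data (k : Int) (fun j => PySem.List.pyGetD best j 0 == 1) =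
      pvBase f data (best.drop k) := by
  intro data
  induction data with
  | nil => intro k best; simp [pvSumSel_nil, pvBase]
  | cons d t ih =>
    intro k best
    rw [pvSumSel_cons]
    have hk1 : ((k : Int) + 1) = ((k + 1 : Nat) : Int) := by push_cast; ring
    rw [hk1, ih (k + 1) best]
    rcases hdr : best.drop k with _ | ⟨b, r⟩
    · have hlen : best.length ≤ k := by
        have := List.drop_eq_nil_iff.mp hdr; omega
      have hout : PySem.List.pyGetD best (k : Int) 0 = 0 := by
        rw [PySem.List.pyGetD_natCast]
        exact List.getD_eq_default _ _ hlen
      have hdr1 : best.drop (k + 1) = [] := List.drop_eq_nil_iff.mpr (by omega)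
      simp [hout, hdr1, pvBase]
    · have hk : k < best.length := by
        by_contra h
        rw [List.drop_eq_nil_iff.mpr (by omega)] at hdr; simp at hdr
      have hb : PySem.List.pyGetD best (k : Int) 0 = b := by
        have h0 : (best.drop k)[0]? = some b := by rw [hdr]; rfl
        rw [List.getElem?_drop] at h0
        simp only [Nat.add_zero] at h0
        rw [PySem.List.pyGetD_natCast, List.getD_eq_getElem?_getD, h0]
        rfl
      have hr : best.drop (k + 1) = r := by
        rw [← List.tail_drop, hdr]
        rfl
      rw [hr, hb, pvBase_cons]
      by_cases h1 : b = 1 <;> simp [h1]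

lemma pvSumSel_flipAt (f : Int × Int → Int) (data : List (Int × Int)) (best : List Int)
    (i : Nat) (hi : i < best.length) :
    pvSumSel f data 0 (fun j => PySem.List.pyGetD (pvFlipA best i) j 0 == 1) =
      pvBase f data best + (if i < data.length then pvDlt f data best i else 0) := by
  have hag : ∀ j : Int, (0 : Int) ≤ j → j ≠ (i : Int) →
      (PySem.List.pyGetD (pvFlipA best i) j 0 == 1) = (PySem.List.pyGetD best j 0 == 1) := by
    intro j hj hne
    obtain ⟨m, rfl⟩ : ∃ m : Nat, j = (m : Int) := ⟨j.toNat, by omega⟩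
    have hm : m ≠ i := by intro h; exact hne (by rw [h])
    rw [PySem.List.pyGetD_natCast, PySem.List.pyGetD_natCast, pvFlipA,
      List.getD_eq_getElem?_getD, List.getElem?_set_ne (fun h => hm h.symm),
      List.getD_eq_getElem?_getD]
  have hflip := pvSumSel_flip f (fun j => PySem.List.pyGetD best j 0 == 1)
    (fun j => PySem.List.pyGetD (pvFlipA best i) j 0 == 1) (i : Int) data 0 (by omega) hag
  have hbase := pvSumSel_eq_pvBase f data 0 best
  rw [Nat.cast_zero, List.drop_zero] at hbase
  rw [hflip, hbase]
  congr 1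
  beta_reduce
  have hseli : (PySem.List.pyGetD best (i : Int) 0 == 1) = (best.getD i 0 == 1) := by
    rw [PySem.List.pyGetD_natCast]
  have hself : PySem.List.pyGetD (pvFlipA best i) (i : Int) 0 =
      (if best.getD i 0 = 0 then 1 else 0) := by
    rw [PySem.List.pyGetD_natCast, pvFlipA, List.getD_eq_getElem _ 0 (by simpa using hi),
      List.getElem_set_self]
  by_cases hlt : i < data.length
  · rw [if_pos (by omega), if_pos hlt]
    have hidx : ((i : Int) - 0).toNat = i := by omega
    rw [hidx, hseli, hself, pvDlt]
    by_cases hz : best.getD i 0 = 0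
    · rw [hz]; norm_num
    · by_cases ho : best.getD i 0 = 1
      · rw [ho]; norm_num
      · have e1 : ((if best.getD i 0 = 0 then (1 : Int) else 0) == 1) = false := by
          rw [if_neg hz]; exact beq_eq_false_iff_ne.mpr (by norm_num)
        have e2 : (best.getD i 0 == 1) = false := beq_eq_false_iff_ne.mpr ho
        rw [e1, e2, if_neg hz, if_neg ho]
        ring
  · rw [if_neg (by omega), if_neg hlt]

lemma pvBase_flip (f : Int × Int → Int) (data : List (Int × Int)) (best : List Int)
    (i : Nat) (hi : i < best.length) :
    pvBase f data (pvFlipA best i) =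
      pvBase f data best + (if i < data.length then pvDlt f data best i else 0) := by
  have h1 := pvSumSel_eq_pvBase f data 0 (pvFlipA best i)
  rw [Nat.cast_zero, List.drop_zero] at h1
  rw [← h1, pvSumSel_flipAt f data best i hi]

lemma pvBase_take_zero (f : Int × Int → Int) :
    ∀ (data : List (Int × Int)) (best : List Int),
    (∀ s ∈ best.take data.length, s ≠ 1) → pvBase f data best = 0 := by
  intro data
  induction data with
  | nil => intro best _; simp [pvBase]
  | cons d t ih =>
    intro best h
    cases best with
    | nil => simp [pvBase]
    | cons b r =>
      simp only [List.length_cons, List.take_succ_cons, List.mem_cons] at h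
      rw [pvBase_cons, if_neg (h b (Or.inl rfl)), ih r (fun s hs => h s (Or.inr hs))]
      ring

-- relation between A's in-pass state and B's in-pass state over start solution `best`
def pvRel (data : List (Int × Int)) (best : List Int) (val : Int)
    (stA : List Int × Int × Bool) (stB : Int × Int) : Prop :=
  stA.2.1 = stB.2 ∧ val ≤ stB.2 ∧
  (stB.1 < 0 → stA = (best, stB.2, false)) ∧
  (0 ≤ stB.1 → stB.1.toNat < data.length ∧
    stA = (pvFlipA best stB.1.toNat, stB.2, true) ∧
    stB.2 = pvBase (fun p => p.2) data best +
      pvDlt (fun p => p.2) data best stB.1.toNat)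

lemma pvStep_rel (data : List (Int × Int)) (mw : Int) (best : List Int) (val : Int) (i : Nat)
    (hin : i < data.length) (hi : i < best.length) (stA : List Int × Int × Bool) (stB : Int × Int)
    (h : pvRel data best val stA stB) :
    pvRel data best val (pvStepA data mw stA (pvFlipA best i))
      (pvStepB data mw (pvBase (fun p => p.1) data best) (pvBase (fun p => p.2) data best)
        best stB i) := by
  have hw : pvWeightA data (pvFlipA best i) =
      pvBase (fun p => p.1) data best + pvDlt (fun p => p.1) data best i := by
    rw [pvWeightA, pvSumSel_flipAt _ data best i hi, if_pos hin]
  have hv : pvValueA data (pvFlipA best i) =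
      pvBase (fun p => p.2) data best + pvDlt (fun p => p.2) data best i := by
    rw [pvValueA, pvSumSel_flipAt _ data best i hi, if_pos hin]
  simp only [pvStepA, pvStepB] at *
  rw [hw, hv, h.1]
  by_cases hc : pvBase (fun p => p.1) data best + pvDlt (fun p => p.1) data best i ≤ mw ∧
      stB.2 < pvBase (fun p => p.2) data best + pvDlt (fun p => p.2) data best i
  · rw [if_pos hc, if_pos hc]
    refine ⟨rfl, by have := h.2.1; omega, by intro h0; omega, fun _ => ⟨by simpa using hin, ?_, ?_⟩⟩
    · simp
    · simp
  · rw [if_neg hc, if_neg hc]; exact h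

lemma pvFold_rel (data : List (Int × Int)) (mw : Int) (best : List Int) (val : Int) :
    ∀ (l : List Nat) (stA : List Int × Int × Bool) (stB : Int × Int),
    (∀ i ∈ l, i < data.length ∧ i < best.length) → pvRel data best val stA stB →
    pvRel data best val (l.foldl (fun st i => pvStepA data mw st (pvFlipA best i)) stA)
      (l.foldl (pvStepB data mw (pvBase (fun p => p.1) data best)
        (pvBase (fun p => p.2) data best) best) stB) := by
  intro l
  induction l with
  | nil => intro stA stB _ h; exact h
  | cons i t ih =>
    intro stA stB hmem h
    exact ih _ _ (fun j hj => hmem j (List.mem_cons_of_mem _ hj))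
      (pvStep_rel data mw best val i (hmem i List.mem_cons_self).1
        (hmem i List.mem_cons_self).2 stA stB h)

lemma pvStepA_tail (data : List (Int × Int)) (mw : Int) (best : List Int) (i : Nat)
    (hn : data.length ≤ i) (hi : i < best.length) (st : List Int × Int × Bool)
    (hval : pvBase (fun p => p.2) data best ≤ st.2.1) :
    pvStepA data mw st (pvFlipA best i) = st := by
  have hv : pvValueA data (pvFlipA best i) = pvBase (fun p => p.2) data best := by
    rw [pvValueA, pvSumSel_flipAt _ data best i hi, if_neg (by omega)]
    ring
  simp only [pvStepA, hv]
  exact if_neg (fun hc => absurd hc.2 (not_lt.mpr hval))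

lemma pvFold_tail (data : List (Int × Int)) (mw : Int) (best : List Int) :
    ∀ (l : List Nat) (st : List Int × Int × Bool),
    (∀ i ∈ l, data.length ≤ i ∧ i < best.length) →
    pvBase (fun p => p.2) data best ≤ st.2.1 →
    l.foldl (fun st i => pvStepA data mw st (pvFlipA best i)) st = st := by
  intro l
  induction l with
  | nil => intro st _ _; rfl
  | cons i t ih =>
    intro st hmem hval
    rw [List.foldl_cons,
      pvStepA_tail data mw best i (hmem i List.mem_cons_self).1 (hmem i List.mem_cons_self).2 st hval]
    exact ih st (fun j hj => hmem j (List.mem_cons_of_mem _ hj)) hval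

lemma pvLoop_eq (data : List (Int × Int)) (mw : Int) :
    ∀ (fuel : Nat) (best : List Int) (val : Int),
    data.length ≤ best.length →
    (best.length = data.length ∨ val = pvBase (fun p => p.2) data best) →
    pvLoopA data mw fuel best val = pvLoopB data mw fuel best val := by
  intro fuel
  induction fuel with
  | zero => intro best val _ _; rfl
  | succ f ih =>
    intro best val hlen hinv
    have hfold := pvFold_rel data mw best val (List.range data.length)
      (best, val, false) (-1, val)
      (fun i hi => ⟨List.mem_range.mp hi, lt_of_lt_of_le (List.mem_range.mp hi) hlen⟩)
      ⟨rfl, le_rfl, fun _ => rfl, fun h => absurd h (by norm_num)⟩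
    set stB := (List.range data.length).foldl
      (pvStepB data mw (pvBase (fun p => p.1) data best)
        (pvBase (fun p => p.2) data best) best) (-1, val) with hstB
    set stA := (List.range data.length).foldl
      (fun st i => pvStepA data mw st (pvFlipA best i)) (best, val, false) with hstA
    -- A's fold over all of range best.length collapses to the fold over range data.length
    have hAfull : (pvNeighbors best).foldl (pvStepA data mw) (best, val, false) = stA := by
      rw [pvNeighbors, List.foldl_map]
      have hm : best.length = data.length + (best.length - data.length) := by omega
      rw [hm, List.range_add, List.foldl_append, ← hstA]
      rcases hinv with heq | hval
      · have h0 : best.length - data.length = 0 := by omega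
        rw [h0]; rfl
      · apply pvFold_tail data mw best
        · intro i hi
          obtain ⟨j, hj, rfl⟩ := List.mem_map.mp hi
          have := List.mem_range.mp hj
          constructor <;> omega
        · rw [hfold.1, ← hval]
          exact hfold.2.1
    rw [pvLoopA, pvLoopB, hAfull]
    by_cases hneg : stB.1 < 0
    · have hA := hfold.2.2.1 hneg
      rw [← hstB, ← hstA] at *
      rw [hA]
      simp [hneg]
    · obtain ⟨hlt, hAeq, hvaleq⟩ := hfold.2.2.2 (by omega)
      rw [hAeq, if_pos rfl, if_neg hneg]
      exact ih (pvFlipA best stB.1.toNat) stB.2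
        (by rw [pvFlipA, List.length_set]; exact hlen)
        (Or.inr (by
          rw [pvBase_flip _ data best stB.1.toNat (by omega), if_pos hlt, ← hvaleq]))

-- ===== VERDICT =====
theorem greedy_search_spec : Claim_equal_greedy_search := by
  intro data mw cur _ hpre
  unfold Spec_greedy_search greedy_search greedy_search_alt
  by_cases hc : cur = []
  · rw [if_pos hc]
    exact pvLoop_eq data mw _ _ _ (by simp) (Or.inl (by simp))
  · rw [if_neg hc]
    rcases hpre with h | h | ⟨h1, h2⟩
    · exact absurd h hc
    · exact pvLoop_eq data mw _ _ _ (by omega) (Or.inl h)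
    · exact pvLoop_eq data mw _ _ _ (by omega)
        (Or.inr ((pvBase_take_zero _ data cur h2).symm))
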